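-- pv_equiv track=rewrite | github.com/Jay-Martinez-Cloud/conversion-core-project | python/db.py | _split_sql_batches
-- ===== SOURCE A (Python) =====
-- def _split_sql_batches(sql_text: str):
--     """
--     Split SQL text on lines that contain only 'GO'
--     (case-insensitive), like SSMS.
--     """
--     batches = []
--     current = []
--
--     for line in sql_text.splitlines():
--         if line.strip().upper() == "GO":
--             if current:
--                 batches.append("\n".join(current).strip())
--                 current = []
--         else:
--             current.append(line)
--
--     if current:
--         batches.append("\n".join(current).strip())
--
--     return [b for b in batches if b]
-- ===== SOURCE B (Python) =====
-- def _split_sql_batches(sql_text: str):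
--     """Split SQL text on lines that contain only 'GO' (case-insensitive), like SSMS."""
--
--     def is_go(line):
--         return line.strip().upper() == "GO"
--
--     def groups(lines):
--         gs = []
--         rest = lines
--         while rest:
--             if is_go(rest[0]):
--                 rest = rest[1:]
--             else:
--                 grp = [rest[0]]
--                 rest = rest[1:]
--                 while rest and not is_go(rest[0]):
--                     grp.append(rest[0])
--                     rest = rest[1:]
--                 gs.append(grp)
--         return gs
--
--     batches = ["\n".join(g).strip() for g in groups(sql_text.splitlines())]
--     return [b for b in batches if b]
-- ===== Notes on version B (the rewrite author's own statement) =====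
-- stated objective: alternative
-- what changed: Replaced A's stateful accumulate-and-flush loop (current/batches with a final flush) by a partition-then-map pipeline: group maximal runs of consecutive non-GO lines, then join/strip each group and filter out empty batches.
import Mathlib
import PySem

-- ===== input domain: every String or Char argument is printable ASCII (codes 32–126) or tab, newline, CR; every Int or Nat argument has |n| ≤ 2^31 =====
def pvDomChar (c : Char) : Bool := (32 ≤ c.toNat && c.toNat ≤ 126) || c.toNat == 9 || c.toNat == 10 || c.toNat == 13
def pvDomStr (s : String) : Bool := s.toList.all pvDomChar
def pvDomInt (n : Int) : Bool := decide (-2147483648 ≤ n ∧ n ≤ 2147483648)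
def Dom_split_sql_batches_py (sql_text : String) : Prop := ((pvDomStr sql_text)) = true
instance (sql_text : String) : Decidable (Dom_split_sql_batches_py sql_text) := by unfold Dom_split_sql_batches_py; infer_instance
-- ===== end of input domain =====

-- B replaces A's stateful accumulate-and-flush loop by a partition-then-map pipeline
-- (group consecutive non-GO lines, then join/strip/filter); objective: alternative decomposition.

-- ===== PORT A =====
-- literal transliteration of A's accumulate-and-flush loop
def split_sql_batches_py (sql_text : String) : List String :=
  let st := (PySem.Str.splitlines sql_text).foldl
    (fun (st : List String × List String) line =>
      if PySem.Str.upper (PySem.Str.strip line) == "GO" then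
        if st.2 ≠ [] then (st.1 ++ [PySem.Str.strip (PySem.Str.join "\n" st.2)], [])
        else st
      else (st.1, st.2 ++ [line])) ([], [])
  let batches := if st.2 ≠ [] then st.1 ++ [PySem.Str.strip (PySem.Str.join "\n" st.2)] else st.1
  batches.filter (fun b => !(b == ""))

-- ===== PORT B =====
def pvIsGo (line : String) : Bool := PySem.Str.upper (PySem.Str.strip line) == "GO"

-- inner while loop of Source B's `groups`: extend the group while the next line is not GO
def pvSpanGrp (grp : List String) : List String → List String × List String
  | [] => (grp, [])
  | r :: rs => if pvIsGo r then (grp, r :: rs) else pvSpanGrp (grp ++ [r]) rs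

-- termination lemma for pvGroups (cited by its decreasing_by)
theorem pvSpanGrp_snd_length (grp ls : List String) : (pvSpanGrp grp ls).2.length ≤ ls.length := by
  induction ls generalizing grp with
  | nil => simp [pvSpanGrp]
  | cons r rs ih =>
    simp only [pvSpanGrp]
    split
    · simp
    · exact le_trans (ih _) (Nat.le_succ _)

-- outer while loop of Source B's `groups`
def pvGroups : List String → List (List String)
  | [] => []
  | l :: ls =>
    if pvIsGo l then pvGroups ls
    else
      let p := pvSpanGrp [l] ls
      p.1 :: pvGroups p.2
termination_by ls => ls.length
decreasing_by
  · simp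
  · exact Nat.lt_succ_of_le (pvSpanGrp_snd_length [l] ls)

def split_sql_batches_py_alt (sql_text : String) : List String :=
  let batches := (pvGroups (PySem.Str.splitlines sql_text)).map
    (fun g => PySem.Str.strip (PySem.Str.join "\n" g))
  batches.filter (fun b => !(b == ""))

-- ===== PRECONDITION & SPEC =====
def Spec_split_sql_batches_py (sql_text : String) (out : List String) : Prop := out = split_sql_batches_py_alt sql_text
instance (sql_text : String) (out : List String) : Decidable (Spec_split_sql_batches_py sql_text out) := by unfold Spec_split_sql_batches_py; infer_instance

-- ===== CLAIM (what is proved, stated in full; the proofs are below) =====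
def Claim_equal_split_sql_batches_py : Prop := ∀ (sql_text : String), Dom_split_sql_batches_py sql_text → Spec_split_sql_batches_py sql_text (split_sql_batches_py sql_text)

-- ===== LEMMAS AND PROOFS =====

-- recursive rendering of A's loop state evolution (proof helper)
def pvG : List String → List String → List String
  | [], c => if c ≠ [] then [PySem.Str.strip (PySem.Str.join "\n" c)] else []
  | l :: ls, c =>
    if pvIsGo l then
      (if c ≠ [] then PySem.Str.strip (PySem.Str.join "\n" c) :: pvG ls [] else pvG ls [])
    else pvG ls (c ++ [l])

theorem pvFold_eq_pvG (ls : List String) : ∀ b c : List String,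
    (if (List.foldl
        (fun (st : List String × List String) line =>
          if PySem.Str.upper (PySem.Str.strip line) == "GO" then
            if st.2 ≠ [] then (st.1 ++ [PySem.Str.strip (PySem.Str.join "\n" st.2)], [])
            else st
          else (st.1, st.2 ++ [line])) (b, c) ls).2 ≠ [] then
      (List.foldl
        (fun (st : List String × List String) line =>
          if PySem.Str.upper (PySem.Str.strip line) == "GO" then
            if st.2 ≠ [] then (st.1 ++ [PySem.Str.strip (PySem.Str.join "\n" st.2)], [])
            else st
          else (st.1, st.2 ++ [line])) (b, c) ls).1 ++
        [PySem.Str.strip (PySem.Str.join "\n" (List.foldl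
        (fun (st : List String × List String) line =>
          if PySem.Str.upper (PySem.Str.strip line) == "GO" then
            if st.2 ≠ [] then (st.1 ++ [PySem.Str.strip (PySem.Str.join "\n" st.2)], [])
            else st
          else (st.1, st.2 ++ [line])) (b, c) ls).2)]
    else (List.foldl
        (fun (st : List String × List String) line =>
          if PySem.Str.upper (PySem.Str.strip line) == "GO" then
            if st.2 ≠ [] then (st.1 ++ [PySem.Str.strip (PySem.Str.join "\n" st.2)], [])
            else st
          else (st.1, st.2 ++ [line])) (b, c) ls).1)
    = b ++ pvG ls c := by
  induction ls with
  | nil =>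
    intro b c
    by_cases h : c = [] <;> simp [pvG, h]
  | cons l t ih =>
    intro b c
    simp only [List.foldl_cons]
    by_cases hg : (PySem.Str.upper (PySem.Str.strip l) == "GO") = true
    · by_cases hc : c = []
      · subst hc
        simpa [pvG, pvIsGo, hg] using ih b []
      · simpa [pvG, pvIsGo, hg, hc] using ih (b ++ [PySem.Str.strip (PySem.Str.join "\n" c)]) []
    · simpa [pvG, pvIsGo, hg] using ih b (c ++ [l])

theorem pvSpanGrp_eq (ls : List String) : ∀ g : List String,
    pvSpanGrp g ls = (g ++ ls.takeWhile (fun l => !pvIsGo l), ls.dropWhile (fun l => !pvIsGo l)) := by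
  induction ls with
  | nil => intro g; simp [pvSpanGrp]
  | cons r rs ih =>
    intro g
    by_cases h : pvIsGo r = true
    · simp [pvSpanGrp, h]
    · have hb : pvIsGo r = false := by simpa using h
      simp [pvSpanGrp, hb, ih]

theorem pvG_eq_groups (ls : List String) : ∀ c : List String,
    pvG ls c = (if c = [] then (pvGroups ls).map (fun g => PySem.Str.strip (PySem.Str.join "\n" g))
      else PySem.Str.strip (PySem.Str.join "\n" (c ++ ls.takeWhile (fun l => !pvIsGo l))) ::
        (pvGroups (ls.dropWhile (fun l => !pvIsGo l))).map (fun g => PySem.Str.strip (PySem.Str.join "\n" g))) := by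
  induction ls with
  | nil =>
    intro c
    by_cases h : c = [] <;> simp [pvG, pvGroups, h]
  | cons l t ih =>
    intro c
    by_cases hg : pvIsGo l = true
    · by_cases hc : c = []
      · simp [pvG, hg, hc, pvGroups, ih]
      · simp [pvG, hg, hc, pvGroups, ih]
    · have hb : pvIsGo l = false := by simpa using hg
      have hgrp : pvGroups (l :: t) =
          (l :: t.takeWhile (fun l => !pvIsGo l)) :: pvGroups (t.dropWhile (fun l => !pvIsGo l)) := by
        rw [pvGroups]
        simp [hb, pvSpanGrp_eq]
      by_cases hc : c = []
      · subst hc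
        rw [show pvG (l :: t) [] = pvG t [l] by simp [pvG, hb]]
        rw [ih [l]]
        simp [hgrp]
      · rw [show pvG (l :: t) c = pvG t (c ++ [l]) by simp [pvG, hb]]
        rw [ih (c ++ [l])]
        simp [hc, hb, List.append_assoc]

-- ===== VERDICT (by name: the statement is the Claim_ definition above) =====
theorem split_sql_batches_py_spec : Claim_equal_split_sql_batches_py := by
  intro s _
  unfold Spec_split_sql_batches_py
  simp only [split_sql_batches_py, split_sql_batches_py_alt]
  rw [pvFold_eq_pvG]
  rw [pvG_eq_groups]
  simp
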